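-- pv_equiv track=rewrite | github.com/gibsonv32/meridianpathfinder | Desktop/Fed select clone/backend/core/lineage_extension.py | _compute_impact_severity
-- ===== SOURCE A (Python) =====
-- def _compute_impact_severity(
--     changed_doc: str, affected_docs: list[str],
-- ) -> dict[str, int]:
--     """Classify impact severity based on affected documents."""
--     severity = {"critical": 0, "high": 0, "medium": 0, "low": 0}
--
--     CRITICAL_DOCS = {"eval_worksheet", "section_m", "ssp"}
--     HIGH_DOCS = {"section_l", "bcm", "award_notice", "pws"}
--     MEDIUM_DOCS = {"igce", "qasp", "security_requirements", "ja", "df", "ap"}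
--     LOW_DOCS = {"sb_review", "cor_nomination"}
--
--     for doc in affected_docs:
--         if doc in CRITICAL_DOCS:
--             severity["critical"] += 1
--         elif doc in HIGH_DOCS:
--             severity["high"] += 1
--         elif doc in MEDIUM_DOCS:
--             severity["medium"] += 1
--         elif doc in LOW_DOCS:
--             severity["low"] += 1
--         else:
--             severity["medium"] += 1
--
--     return severity
-- ===== SOURCE B (Python) =====
-- CRITICAL_DOCS = frozenset({"eval_worksheet", "section_m", "ssp"})
-- HIGH_DOCS = frozenset({"section_l", "bcm", "award_notice", "pws"})
-- LOW_DOCS = frozenset({"sb_review", "cor_nomination"})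
--
--
-- def _compute_impact_severity(changed_doc, affected_docs):
--     """Classify impact severity based on affected documents."""
--     c = sum(1 for d in affected_docs if d in CRITICAL_DOCS)
--     h = sum(1 for d in affected_docs if d in HIGH_DOCS)
--     low = sum(1 for d in affected_docs if d in LOW_DOCS)
--     return {"critical": c, "high": h,
--             "medium": len(affected_docs) - c - h - low, "low": low}
-- ===== Notes on version B (the rewrite author's own statement) =====
-- stated objective: simpler
-- what changed: Instead of classifying each element through a four-way branch chain and tallying, B takes three independent membership counts (critical/high/low) and derives medium by complement (len - c - h - low), so the medium set and the per-element branching disappear entirely.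
import Mathlib
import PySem

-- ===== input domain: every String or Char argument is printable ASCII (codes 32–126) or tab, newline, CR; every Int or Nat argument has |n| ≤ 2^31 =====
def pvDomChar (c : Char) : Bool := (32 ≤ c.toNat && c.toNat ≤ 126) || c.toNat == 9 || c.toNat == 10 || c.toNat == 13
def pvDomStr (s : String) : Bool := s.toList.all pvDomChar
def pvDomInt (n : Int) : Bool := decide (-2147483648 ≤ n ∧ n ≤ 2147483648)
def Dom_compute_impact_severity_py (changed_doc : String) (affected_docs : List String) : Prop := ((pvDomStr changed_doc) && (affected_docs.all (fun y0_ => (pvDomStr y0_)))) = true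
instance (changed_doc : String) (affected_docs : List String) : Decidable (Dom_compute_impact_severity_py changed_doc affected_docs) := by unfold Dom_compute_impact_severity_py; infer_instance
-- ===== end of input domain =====

-- B replaces A's per-element four-way branch-and-tally loop by three independent
-- membership counts (critical/high/low) and derives medium by complement (simpler).

-- ===== PORT A =====
def pvCriticalDocs : List String := PySem.Set.ofList ["eval_worksheet", "section_m", "ssp"]
def pvHighDocs : List String := PySem.Set.ofList ["section_l", "bcm", "award_notice", "pws"]
def pvMediumDocs : List String := PySem.Set.ofList ["igce", "qasp", "security_requirements", "ja", "df", "ap"]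
def pvLowDocs : List String := PySem.Set.ofList ["sb_review", "cor_nomination"]

def pvStepA (d : PySem.Dict String Int) (doc : String) : PySem.Dict String Int :=
  if pvCriticalDocs.contains doc then d.insert "critical" (d.getD "critical" 0 + 1)
  else if pvHighDocs.contains doc then d.insert "high" (d.getD "high" 0 + 1)
  else if pvMediumDocs.contains doc then d.insert "medium" (d.getD "medium" 0 + 1)
  else if pvLowDocs.contains doc then d.insert "low" (d.getD "low" 0 + 1)
  else d.insert "medium" (d.getD "medium" 0 + 1)

def compute_impact_severity_py (changed_doc : String) (affected_docs : List String) : List (String × Int) :=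
  (affected_docs.foldl pvStepA
    (PySem.Dict.ofList [("critical", 0), ("high", 0), ("medium", 0), ("low", 0)])).items

-- ===== PORT B =====
def pvCritB : List String := ["eval_worksheet", "section_m", "ssp"]
def pvHighB : List String := ["section_l", "bcm", "award_notice", "pws"]
def pvLowB : List String := ["sb_review", "cor_nomination"]

def compute_impact_severity_py_alt (changed_doc : String) (affected_docs : List String) : List (String × Int) :=
  let c : Int := (affected_docs.countP (fun d => pvCritB.contains d) : Nat)
  let h : Int := (affected_docs.countP (fun d => pvHighB.contains d) : Nat)
  let low : Int := (affected_docs.countP (fun d => pvLowB.contains d) : Nat)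
  [("critical", c), ("high", h), ("medium", (affected_docs.length : Int) - c - h - low), ("low", low)]

-- ===== PRECONDITION & SPEC =====
def Spec_compute_impact_severity_py (changed_doc : String) (affected_docs : List String) (out : List (String × Int)) : Prop := out = compute_impact_severity_py_alt changed_doc affected_docs
instance (changed_doc : String) (affected_docs : List String) (out : List (String × Int)) : Decidable (Spec_compute_impact_severity_py changed_doc affected_docs out) := by unfold Spec_compute_impact_severity_py; infer_instance

-- ===== CLAIM (what is proved, stated in full; the proofs are below) =====
def Claim_equal_compute_impact_severity_py : Prop := ∀ (changed_doc : String) (affected_docs : List String), Dom_compute_impact_severity_py changed_doc affected_docs → Spec_compute_impact_severity_py changed_doc affected_docs (compute_impact_severity_py changed_doc affected_docs)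

-- ===== LEMMAS AND PROOFS =====

-- the Booleans A's branch chain tests, in branch order
def pvPC (d : String) : Bool := pvCriticalDocs.contains d
def pvPH (d : String) : Bool := !pvPC d && pvHighDocs.contains d
def pvPM (d : String) : Bool := !pvPC d && !pvHighDocs.contains d && (pvMediumDocs.contains d || !pvLowDocs.contains d)
def pvPL (d : String) : Bool := !pvPC d && !pvHighDocs.contains d && !pvMediumDocs.contains d && pvLowDocs.contains d

-- one step of A's loop bumps exactly the branch that fires
theorem pvStepA_eq (doc : String) (c h m l : Int) :
    pvStepA (PySem.Dict.mk [("critical", c), ("high", h), ("medium", m), ("low", l)]) doc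
    = PySem.Dict.mk [("critical", c + if pvPC doc then 1 else 0),
                     ("high", h + if pvPH doc then 1 else 0),
                     ("medium", m + if pvPM doc then 1 else 0),
                     ("low", l + if pvPL doc then 1 else 0)] := by
  by_cases hc : doc ∈ pvCriticalDocs <;>
    by_cases hh : doc ∈ pvHighDocs <;>
      by_cases hm : doc ∈ pvMediumDocs <;>
        by_cases hl : doc ∈ pvLowDocs <;>
          simp [pvStepA, pvPC, pvPH, pvPM, pvPL, hc, hh, hm, hl,
            PySem.Dict.insert, PySem.Dict.getD, PySem.Dict.get?]

-- A's fold tallies the countP of each branch predicate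
theorem pvFoldA (docs : List String) (c h m l : Int) :
    docs.foldl pvStepA (PySem.Dict.mk [("critical", c), ("high", h), ("medium", m), ("low", l)])
    = PySem.Dict.mk [("critical", c + (docs.countP pvPC : Nat)),
                     ("high", h + (docs.countP pvPH : Nat)),
                     ("medium", m + (docs.countP pvPM : Nat)),
                     ("low", l + (docs.countP pvPL : Nat))] := by
  induction docs generalizing c h m l with
  | nil => simp
  | cons doc rest ih =>
    rw [List.foldl_cons, pvStepA_eq, ih]
    simp only [List.countP_cons]
    refine congrArg PySem.Dict.mk ?_
    simp only [List.cons.injEq, Prod.mk.injEq]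
    split_ifs <;> refine ⟨⟨by trivial, by omega⟩, ⟨by trivial, by omega⟩, ⟨by trivial, by omega⟩, ⟨by trivial, by omega⟩, by trivial⟩

-- the high branch fires exactly on HIGH_DOCS (the sets are disjoint)
theorem pvPH_eq (d : String) : pvPH d = pvHighB.contains d := by
  unfold pvPH
  rw [show pvHighDocs = pvHighB from rfl]
  cases hb : pvHighB.contains d
  · simp
  · have hm : d ∈ pvHighB := by simpa using hb
    simp only [pvHighB, List.mem_cons, List.not_mem_nil, or_false] at hm
    rcases hm with h | h | h | h <;> subst h <;> decide

-- the low branch fires exactly on LOW_DOCS (the sets are disjoint)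
theorem pvPL_eq (d : String) : pvPL d = pvLowB.contains d := by
  unfold pvPL
  rw [show pvLowDocs = pvLowB from rfl]
  cases hb : pvLowB.contains d
  · simp
  · have hm : d ∈ pvLowB := by simpa using hb
    simp only [pvLowB, List.mem_cons, List.not_mem_nil, or_false] at hm
    rcases hm with h | h <;> subst h <;> decide

-- exactly one of A's four branches fires on each element
theorem pvSum_one (d : String) :
    ((if pvPC d then 1 else 0) + (if pvPH d then 1 else 0)
      + (if pvPM d then 1 else 0) + (if pvPL d then 1 else 0) : Nat) = 1 := by
  by_cases hc : d ∈ pvCriticalDocs <;> by_cases hh : d ∈ pvHighDocs <;>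
    by_cases hm : d ∈ pvMediumDocs <;> by_cases hl : d ∈ pvLowDocs <;>
      simp [pvPC, pvPH, pvPM, pvPL, hc, hh, hm, hl]

-- so the four branch counts sum to the length
theorem pvCount_sum (docs : List String) :
    docs.countP pvPC + docs.countP pvPH + docs.countP pvPM + docs.countP pvPL
      = docs.length := by
  induction docs with
  | nil => rfl
  | cons d rest ih =>
    simp only [List.countP_cons, List.length_cons]
    have := pvSum_one d
    omega

-- ===== VERDICT (by name: the statement is the Claim_ definition above) =====
theorem compute_impact_severity_py_spec : Claim_equal_compute_impact_severity_py := by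
  intro changed_doc affected_docs _
  unfold Spec_compute_impact_severity_py compute_impact_severity_py compute_impact_severity_py_alt
  rw [show (PySem.Dict.ofList [("critical", (0:Int)), ("high", 0), ("medium", 0), ("low", 0)])
      = PySem.Dict.mk [("critical", 0), ("high", 0), ("medium", 0), ("low", 0)] from rfl]
  rw [pvFoldA]
  have hc : (fun d => pvCritB.contains d) = pvPC := rfl
  have hh : (fun d => pvHighB.contains d) = pvPH := by funext d; exact (pvPH_eq d).symm
  have hl : (fun d => pvLowB.contains d) = pvPL := by funext d; exact (pvPL_eq d).symm
  have hmed : ((affected_docs.countP pvPM : Nat) : Int)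
      = (affected_docs.length : Int) - (affected_docs.countP pvPC : Nat)
        - (affected_docs.countP pvPH : Nat) - (affected_docs.countP pvPL : Nat) := by
    have := pvCount_sum affected_docs
    omega
  simp only [hc, hh, hl, zero_add, hmed]
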